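-- pv_equiv track=rewrite | github.com/Sahil624/data-structures | Arrays/hotel--booking.py | hotel
-- ===== SOURCE A (Python) =====
-- def hotel(arrive, depart, K):
--     arrive.sort(), depart.sort()
--
--     check_for_guest = checking_other_guest = current_guests = 0
--
--     while check_for_guest < len(arrive):
--         if checking_other_guest < len(depart) and depart[checking_other_guest] <= arrive[check_for_guest]:
--             current_guests, checking_other_guest = current_guests - 1, checking_other_guest + 1
--
--         else:
--             current_guests, check_for_guest = current_guests + 1, check_for_guest + 1
--
--         if current_guests > K:
--             return False
--
--     return True
-- ===== SOURCE B (Python) =====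
-- def hotel(arrive, depart, K):
--     arrive.sort()
--     depart.sort()
--     if not arrive:
--         return True
--     # Encode each event as one integer -- 2*t + 1 for an arrival at time t,
--     # 2*t for a departure -- so that sorting the encodings orders events by
--     # time with departures before arrivals at equal times (a guest leaving at
--     # time t frees a room for one arriving at time t).  Then scan the events
--     # once, tracking the current occupancy.
--     events = sorted([2 * t + 1 for t in arrive] + [2 * t for t in depart])
--     cur = 0
--     for e in events:
--         cur += 1 if e % 2 else -1
--         if cur > K:
--             return False
--     return True
-- ===== Notes on version B (the rewrite author's own statement) =====
-- stated objective: alternative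
-- what changed: Replaces the two-pointer merge over the two sorted arrays by one sort of integer-encoded events (2*t+1 for an arrival, 2*t for a departure, so departures sort before arrivals at equal times) followed by a single occupancy scan with the same after-every-event capacity check.
import Mathlib
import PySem

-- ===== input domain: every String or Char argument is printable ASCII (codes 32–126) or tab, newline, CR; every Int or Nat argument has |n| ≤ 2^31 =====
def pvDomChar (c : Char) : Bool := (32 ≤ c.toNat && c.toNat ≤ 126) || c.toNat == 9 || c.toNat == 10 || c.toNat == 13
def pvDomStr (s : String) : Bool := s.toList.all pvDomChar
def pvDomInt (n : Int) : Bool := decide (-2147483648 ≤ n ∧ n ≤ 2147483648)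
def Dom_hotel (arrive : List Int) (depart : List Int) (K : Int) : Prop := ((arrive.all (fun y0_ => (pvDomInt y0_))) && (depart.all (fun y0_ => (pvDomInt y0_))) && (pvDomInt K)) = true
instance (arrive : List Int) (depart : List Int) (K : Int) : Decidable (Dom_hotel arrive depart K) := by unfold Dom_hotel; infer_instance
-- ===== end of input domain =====

-- B replaces A's two-pointer merge of the two sorted arrays by one sort of integer-encoded
-- events followed by a single occupancy scan (objective: alternative).
-- Both A and B sort the two argument lists in place; the equivalence proved here is about the return value.

-- ===== PORT A =====
-- the while loop: state = (check_for_guest, checking_other_guest, current_guests)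
def hotelLoop (a d : List Int) (K : Int) (i j : Nat) (cur : Int) : Bool :=
  if _h : i < a.length then
    if hj : j < d.length then
      if d.getD j 0 ≤ a.getD i 0 then
        if cur - 1 > K then false else hotelLoop a d K i (j + 1) (cur - 1)
      else
        if cur + 1 > K then false else hotelLoop a d K (i + 1) j (cur + 1)
    else
      if cur + 1 > K then false else hotelLoop a d K (i + 1) j (cur + 1)
  else true
termination_by (a.length - i) + (d.length - j)
decreasing_by all_goals omega

def hotel (arrive : List Int) (depart : List Int) (K : Int) : Bool :=
  hotelLoop (PySem.List.sorted arrive (fun x => x)) (PySem.List.sorted depart (fun x => x)) K 0 0 0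

-- ===== PORT B =====
-- the for-loop over the sorted event encodings: cur += 1 if e % 2 else -1; early return False
def altScan (K : Int) : List Int → Int → Bool
  | [], _ => true
  | e :: rest, cur =>
    if cur + (if PySem.Int.mod e 2 ≠ 0 then 1 else -1) > K then false
    else altScan K rest (cur + (if PySem.Int.mod e 2 ≠ 0 then 1 else -1))

def hotel_alt (arrive : List Int) (depart : List Int) (K : Int) : Bool :=
  let a := PySem.List.sorted arrive (fun x => x)
  let d := PySem.List.sorted depart (fun x => x)
  if a = [] then true
  else
    let events := PySem.List.sorted (a.map (fun t => 2 * t + 1) ++ d.map (fun t => 2 * t)) (fun x => x)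
    altScan K events 0

-- ===== PRECONDITION & SPEC =====
def Spec_hotel (arrive : List Int) (depart : List Int) (K : Int) (out : Bool) : Prop := out = hotel_alt arrive depart K
instance (arrive : List Int) (depart : List Int) (K : Int) (out : Bool) : Decidable (Spec_hotel arrive depart K out) := by unfold Spec_hotel; infer_instance

-- ===== CLAIM (what is proved, stated in full; the proofs are below) =====
def Claim_equal_hotel : Prop := ∀ (arrive : List Int) (depart : List Int) (K : Int), Dom_hotel arrive depart K → Spec_hotel arrive depart K (hotel arrive depart K)

-- ===== LEMMAS AND PROOFS =====

-- the sorted event encodings, named: merge of 2*x+1 (arrivals) and 2*y (departures), departures first on ties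
def mergeEv : List Int → List Int → List Int
  | [], [] => []
  | [], y :: d => 2 * y :: mergeEv [] d
  | x :: a, [] => (2 * x + 1) :: mergeEv a []
  | x :: a, y :: d => if y ≤ x then 2 * y :: mergeEv (x :: a) d else (2 * x + 1) :: mergeEv a (y :: d)
termination_by a d => a.length + d.length

theorem mod_two_even (y : Int) : PySem.Int.mod (2 * y) 2 = 0 := by
  rw [PySem.Int.mod_eq_emod_of_pos (by norm_num)]; omega

theorem mod_two_odd (x : Int) : PySem.Int.mod (2 * x + 1) 2 = 1 := by
  rw [PySem.Int.mod_eq_emod_of_pos (by norm_num)]; omega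

theorem mergeEv_perm : ∀ (a d : List Int),
    (mergeEv a d).Perm (a.map (fun t => 2 * t + 1) ++ d.map (fun t => 2 * t))
  | [], [] => by rw [mergeEv]; rfl
  | [], y :: d => by
      rw [mergeEv]
      simpa using (mergeEv_perm [] d).cons (2 * y)
  | x :: a, [] => by
      rw [mergeEv]
      simpa using (mergeEv_perm a []).cons (2 * x + 1)
  | x :: a, y :: d => by
      rw [mergeEv]
      by_cases h : y ≤ x
      · rw [if_pos h]
        refine ((mergeEv_perm (x :: a) d).cons (2 * y)).trans ?_
        exact (List.perm_middle).symm
      · rw [if_neg h]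
        simpa using (mergeEv_perm a (y :: d)).cons (2 * x + 1)
termination_by a d => a.length + d.length

theorem mergeEv_pairwise : ∀ (a d : List Int), a.Pairwise (· ≤ ·) → d.Pairwise (· ≤ ·) →
    (mergeEv a d).Pairwise (· ≤ ·)
  | [], [] => fun _ _ => by rw [mergeEv]; exact List.Pairwise.nil
  | [], y :: d => fun _ hd => by
      rw [mergeEv]
      rw [List.pairwise_cons] at hd ⊢
      refine ⟨?_, mergeEv_pairwise [] d List.Pairwise.nil hd.2⟩
      intro z hz
      rcases ((mergeEv_perm [] d).mem_iff).mp hz with hz'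
      simp only [List.map_nil, List.nil_append, List.mem_map] at hz'
      obtain ⟨y', hy', rfl⟩ := hz'
      have := hd.1 y' hy'; omega
  | x :: a, [] => fun ha _ => by
      rw [mergeEv]
      rw [List.pairwise_cons] at ha ⊢
      refine ⟨?_, mergeEv_pairwise a [] ha.2 List.Pairwise.nil⟩
      intro z hz
      rcases ((mergeEv_perm a []).mem_iff).mp hz with hz'
      simp only [List.map_nil, List.append_nil, List.mem_map] at hz'
      obtain ⟨x', hx', rfl⟩ := hz'
      have := ha.1 x' hx'; omega
  | x :: a, y :: d => fun ha hd => by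
      rw [mergeEv]
      rw [List.pairwise_cons] at ha hd
      by_cases h : y ≤ x
      · rw [if_pos h]
        rw [List.pairwise_cons]
        refine ⟨?_, mergeEv_pairwise (x :: a) d (List.pairwise_cons.mpr ha) hd.2⟩
        intro z hz
        rcases ((mergeEv_perm (x :: a) d).mem_iff).mp hz with hz'
        rw [List.mem_append] at hz'
        rcases hz' with hz' | hz' <;> rw [List.mem_map] at hz'
        · obtain ⟨x', hx', rfl⟩ := hz'
          rcases List.mem_cons.mp hx' with rfl | hx'
          · omega
          · have := ha.1 x' hx'; omega
        · obtain ⟨y', hy', rfl⟩ := hz'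
          have := hd.1 y' hy'; omega
      · rw [if_neg h]
        rw [List.pairwise_cons]
        refine ⟨?_, mergeEv_pairwise a (y :: d) ha.2 (List.pairwise_cons.mpr hd)⟩
        intro z hz
        rcases ((mergeEv_perm a (y :: d)).mem_iff).mp hz with hz'
        rw [List.mem_append] at hz'
        rcases hz' with hz' | hz' <;> rw [List.mem_map] at hz'
        · obtain ⟨x', hx', rfl⟩ := hz'
          have := ha.1 x' hx'; omega
        · obtain ⟨y', hy', rfl⟩ := hz'
          rcases List.mem_cons.mp hy' with rfl | hy'
          · omega
          · have := hd.1 y' hy'; omega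
termination_by a d => a.length + d.length

-- B's sorted event list IS the merge, when both inputs are sorted
theorem events_eq (a d : List Int) (ha : a.Pairwise (· ≤ ·)) (hd : d.Pairwise (· ≤ ·)) :
    PySem.List.sorted (a.map (fun t => 2 * t + 1) ++ d.map (fun t => 2 * t)) (fun x => x)
      = mergeEv a d :=
  PySem.List.sorted_id_eq_of_perm_of_pairwise _ _ (mergeEv_perm a d) (mergeEv_pairwise a d ha hd)

-- a scan over departure events only never fails once cur ≤ K
theorem altScan_departs (K : Int) : ∀ (d : List Int) (cur : Int), cur ≤ K →
    altScan K (mergeEv [] d) cur = true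
  | [], cur => fun _ => by rw [mergeEv]; rfl
  | y :: d, cur => fun h => by
      rw [mergeEv, altScan]
      rw [mod_two_even]
      simp only [ne_eq, not_true_eq_false, if_false]
      rw [if_neg (by omega)]
      exact altScan_departs K d (cur - 1) (by omega)

-- A's while loop equals B's scan of the merged events, from any consistent state
theorem loopA_eq_scan (a d : List Int) (K : Int) (i j : Nat) (cur : Int)
    (hi : i ≤ a.length) (hj : j ≤ d.length) (hok : i < a.length ∨ cur ≤ K) :
    hotelLoop a d K i j cur = altScan K (mergeEv (a.drop i) (d.drop j)) cur := by
  rw [hotelLoop]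
  by_cases h : i < a.length
  · rw [dif_pos h]
    have hda : a.drop i = a.getD i 0 :: a.drop (i + 1) := by
      rw [List.getD_eq_getElem a 0 h]; exact List.drop_eq_getElem_cons h
    by_cases hjm : j < d.length
    · rw [dif_pos hjm]
      have hdd : d.drop j = d.getD j 0 :: d.drop (j + 1) := by
        rw [List.getD_eq_getElem d 0 hjm]; exact List.drop_eq_getElem_cons hjm
      rw [hda, hdd, mergeEv]
      by_cases hle : d.getD j 0 ≤ a.getD i 0
      · rw [if_pos hle, if_pos hle, altScan, mod_two_even]
        simp only [ne_eq, not_true_eq_false, if_false]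
        have harith : cur + -1 = cur - 1 := by ring
        rw [harith]
        by_cases hg : cur - 1 > K
        · rw [if_pos hg, if_pos hg]
        · rw [if_neg hg, if_neg hg,
            loopA_eq_scan a d K i (j + 1) (cur - 1) hi hjm (Or.inl h), hda]
      · rw [if_neg hle, if_neg hle, altScan, mod_two_odd]
        simp only [ne_eq, one_ne_zero, not_false_eq_true, if_true]
        by_cases hg : cur + 1 > K
        · rw [if_pos hg, if_pos hg]
        · rw [if_neg hg, if_neg hg,
            loopA_eq_scan a d K (i + 1) j (cur + 1) h hj (Or.inr (by omega)), hdd]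
    · rw [dif_neg hjm]
      have hde : d.drop j = [] := List.drop_of_length_le (by omega)
      rw [hda, hde, mergeEv, altScan, mod_two_odd]
      simp only [ne_eq, one_ne_zero, not_false_eq_true, if_true]
      by_cases hg : cur + 1 > K
      · rw [if_pos hg, if_pos hg]
      · rw [if_neg hg, if_neg hg,
          loopA_eq_scan a d K (i + 1) j (cur + 1) h hj (Or.inr (by omega)), hde]
  · rw [dif_neg h]
    have hae : a.drop i = [] := List.drop_of_length_le (by omega)
    rw [hae]
    exact (altScan_departs K (d.drop j) cur (by omega)).symm
termination_by (a.length - i) + (d.length - j)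
decreasing_by all_goals omega

-- ===== VERDICT (by name: the statement is the Claim_ definition above) =====
theorem hotel_spec : Claim_equal_hotel := by
  intro arrive depart K _
  show hotel arrive depart K = hotel_alt arrive depart K
  unfold hotel hotel_alt
  set a := PySem.List.sorted arrive (fun x => x) with hadef
  set d := PySem.List.sorted depart (fun x => x) with hddef
  have ha : a.Pairwise (· ≤ ·) := PySem.List.sorted_pairwise arrive (fun x => x)
  have hd : d.Pairwise (· ≤ ·) := PySem.List.sorted_pairwise depart (fun x => x)
  by_cases hae : a = []
  · rw [if_pos hae, hotelLoop]
    simp [hae]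
  · rw [if_neg hae]
    simp only
    rw [events_eq a d ha hd]
    have h0 : 0 < a.length := List.length_pos_of_ne_nil hae
    simpa using loopA_eq_scan a d K 0 0 0 (by omega) (Nat.zero_le _) (Or.inl h0)
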